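-- pv_equiv track=rewrite | github.com/kiddiRU/Verk1_H1 | Project/UILayer/UtilityUI.py | string_to_table
-- ===== SOURCE A (Python) =====
-- def string_to_table(string_list: list[str]) -> list[str]:
--     """
--     A helper function that formats a given list of string into a 2 column table
--
--     :param string_list: Takes a list of model objects
--     :type string_list: list[str]
--     :return: A formatted list of strings that when displayed appears as a table
--     :rtype: list[str]
--     """
--     output_list: list[str] = []  # list that holds each line as a f-string
--
--     length: int = len(string_list)
--
--     # Loop through and append each line of the
--     for value in range(0, len(string_list), 2):
--         # Get left side item
--         left: str = string_list[value]
--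
--         if value + 1 < length:
--             # get right side item
--             right: str = string_list[value + 1]
--
--             output_list.append(f"{left:<39}|{right:<39}|")
--
--         else:  # odd number, last item has no pair
--             output_list.append(f"{left:<39}|{' ':<39}|")
--
--     return output_list
-- ===== SOURCE B (Python) =====
-- def string_to_table(string_list: list[str]) -> list[str]:
--     """Format a list of strings as two-column table rows (idiomatic iterator pairing)."""
--     it = iter(string_list)
--     return [f"{left:<39}|{next(it, ' '):<39}|" for left in it]
-- ===== Notes on version B (the rewrite author's own statement) =====
-- stated objective: idiomatic
-- what changed: Replaces the index loop over range(0, n, 2) with its parity branch and index arithmetic by pairing elements directly from a single iterator, with next(it, ' ') supplying the blank right cell for an odd-length list.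
import Mathlib
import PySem

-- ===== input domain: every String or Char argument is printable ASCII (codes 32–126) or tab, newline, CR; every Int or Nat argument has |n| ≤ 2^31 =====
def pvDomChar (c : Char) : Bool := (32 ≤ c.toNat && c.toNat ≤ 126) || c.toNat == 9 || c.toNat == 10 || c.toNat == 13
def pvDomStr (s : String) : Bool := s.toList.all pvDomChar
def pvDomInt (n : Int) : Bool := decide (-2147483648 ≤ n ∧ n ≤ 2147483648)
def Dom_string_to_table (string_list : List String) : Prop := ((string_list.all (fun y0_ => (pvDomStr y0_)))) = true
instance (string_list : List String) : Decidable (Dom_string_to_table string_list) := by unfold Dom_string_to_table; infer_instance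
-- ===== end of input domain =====

-- B replaces A's index loop over range(0, n, 2) (with its parity branch) by direct
-- pair-consuming traversal of the list; same output, idiomatic, no speed claim.

-- f"{l:<39}|{r:<39}|" — the shared formatting primitive of both Pythons (exact:
-- pad with spaces to width 39, never truncate), on List Char so the kernel reduces it.
def pvPad39 (cs : List Char) : List Char := cs ++ List.replicate (39 - cs.length) ' '
def pvRow (l r : String) : String := String.ofList (pvPad39 l.toList ++ '|' :: (pvPad39 r.toList ++ ['|']))

-- ===== PORT A =====
def string_to_table (string_list : List String) : List String :=
  let length : Int := string_list.length
  (PySem.List.pyRange 0 string_list.length 2).foldl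
    (fun output_list value =>
      let left := PySem.List.pyGetD string_list value ""
      if value + 1 < length then
        let right := PySem.List.pyGetD string_list (value + 1) ""
        output_list ++ [pvRow left right]
      else
        output_list ++ [pvRow left " "]) []

-- ===== PORT B =====
-- B's list comprehension over the pairing iterator: each step takes `left` and, via
-- next(it, ' '), either the following element or ' ' when the list is exhausted.
def stringToTableGo : List String → List String
  | [] => []
  | [l] => [pvRow l " "]
  | l :: r :: rest => pvRow l r :: stringToTableGo rest

def string_to_table_alt (string_list : List String) : List String :=
  stringToTableGo string_list

-- ===== PRECONDITION & SPEC =====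
def Spec_string_to_table (string_list : List String) (out : List String) : Prop := out = string_to_table_alt string_list
instance (string_list : List String) (out : List String) : Decidable (Spec_string_to_table string_list out) := by unfold Spec_string_to_table; infer_instance

-- ===== CLAIM (what is proved, stated in full; the proofs are below) =====
def Claim_equal_string_to_table : Prop := ∀ (string_list : List String), Dom_string_to_table string_list → Spec_string_to_table string_list (string_to_table string_list)

-- ===== LEMMAS AND PROOFS =====

lemma pyRange_two_shift (a b : Int) :
    PySem.List.pyRange a b 2 = (PySem.List.pyRange 0 (b - a) 2).map (· + a) := by
  rw [PySem.List.pyRange_of_pos a b (by norm_num),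
      PySem.List.pyRange_of_pos 0 (b - a) (by norm_num)]
  have hc : (if a < b then ((b - a + 2 - 1) / 2).toNat else 0)
      = (if (0:Int) < b - a then ((b - a - 0 + 2 - 1) / 2).toNat else 0) := by
    by_cases h : a < b
    · rw [if_pos h, if_pos (by omega)]; ring_nf
    · rw [if_neg h, if_neg (by omega)]
  rw [hc, List.map_map]
  apply List.map_congr_left
  intro k _
  simp; ring

lemma pyRange_two_cons (a b : Int) (h : a < b) :
    PySem.List.pyRange a b 2 = a :: PySem.List.pyRange (a + 2) b 2 := by
  rw [PySem.List.pyRange_of_pos a b (by norm_num),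
      PySem.List.pyRange_of_pos (a + 2) b (by norm_num)]
  have hc : (if a < b then ((b - a + 2 - 1) / 2).toNat else 0)
      = (if a + 2 < b then ((b - (a + 2) + 2 - 1) / 2).toNat else 0) + 1 := by
    by_cases h2 : a + 2 < b
    · rw [if_pos h, if_pos h2]; omega
    · rw [if_pos h, if_neg h2]; omega
  rw [hc, List.range_succ_eq_map]
  simp [List.map_map]
  intro k _
  ring

lemma go_main (xs : List String) :
    (PySem.List.pyRange 0 (xs.length : Int) 2).map
      (fun value =>
        if value + 1 < (xs.length : Int) then
          pvRow (PySem.List.pyGetD xs value "") (PySem.List.pyGetD xs (value + 1) "")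
        else
          pvRow (PySem.List.pyGetD xs value "") " ")
      = stringToTableGo xs := by
  induction xs using stringToTableGo.induct with
  | case1 =>
      have h0 : (([] : List String).length : Int) = 0 := by simp
      rw [h0, PySem.List.pyRange_of_pos 0 0 (by norm_num)]
      simp [stringToTableGo]
  | case2 l =>
      have h1 : (([l] : List String).length : Int) = 1 := by simp
      rw [h1, pyRange_two_cons 0 1 (by norm_num),
          PySem.List.pyRange_of_pos (0 + 2) 1 (by norm_num)]
      rw [if_neg (by norm_num)]
      simp only [List.range_zero, List.map_nil, List.map_cons]
      rw [if_neg (by norm_num)]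
      have hg : PySem.List.pyGetD [l] 0 "" = l := by simp
      rw [hg]
      rfl
  | case3 l r rest ih =>
      have hlen : ((l :: r :: rest).length : Int) = (rest.length : Int) + 2 := by
        simp; ring
      rw [pyRange_two_cons 0 ((l :: r :: rest).length : Int) (by simp; positivity)]
      rw [List.map_cons]
      have h0 : ((0:Int) + 1 < ((l :: r :: rest).length : Int)) := by simp
      rw [if_pos h0]
      have hgl : PySem.List.pyGetD (l :: r :: rest) 0 "" = l := by simp
      have hgr : PySem.List.pyGetD (l :: r :: rest) (0 + 1) "" = r := by
        have := PySem.List.pyGetD_natCast (l :: r :: rest) 1 ""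
        simpa using this
      rw [hgl, hgr, stringToTableGo]
      congr 1
      rw [hlen, show (0 : Int) + 2 = 2 from rfl,
          pyRange_two_shift 2 ((rest.length : Int) + 2)]
      have hsub : ((rest.length : Int) + 2 - 2) = (rest.length : Int) := by ring
      rw [hsub, List.map_map, ← ih]
      apply List.map_congr_left
      intro v hv
      have hv' := (PySem.List.mem_pyRange_iff_of_pos (by norm_num) v).mp hv
      obtain ⟨hv0, hvlt, -⟩ := hv'
      have hif : (v + 2) + 1 < ((rest.length : Int) + 2) ↔ v + 1 < (rest.length : Int) := by
        omega
      have hshift : ∀ (i : Int), 0 ≤ i →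
          PySem.List.pyGetD (l :: r :: rest) (i + 2) "" = PySem.List.pyGetD rest i "" := by
        intro i hi
        rw [PySem.List.pyGetD_of_nonneg _ _ (by omega),
            PySem.List.pyGetD_of_nonneg _ _ hi]
        have : (i + 2).toNat = i.toNat + 2 := by omega
        simp [this]
      simp only [Function.comp]
      by_cases hc : v + 1 < (rest.length : Int)
      · rw [if_pos (by omega), if_pos hc, hshift v hv0,
            show v + 2 + 1 = (v + 1) + 2 by ring, hshift (v + 1) (by omega)]
      · rw [if_neg (by omega), if_neg hc, hshift v hv0]

-- ===== VERDICT (by name: the statement is the Claim_ definition above) =====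
theorem string_to_table_spec : Claim_equal_string_to_table := by
  intro xs _
  show string_to_table xs = string_to_table_alt xs
  unfold string_to_table string_to_table_alt
  dsimp only
  have hfun : (fun (output_list : List String) (value : Int) =>
      if value + 1 < (xs.length : Int) then
        output_list ++ [pvRow (PySem.List.pyGetD xs value "") (PySem.List.pyGetD xs (value + 1) "")]
      else output_list ++ [pvRow (PySem.List.pyGetD xs value "") " "])
    = (fun (output_list : List String) (value : Int) => output_list ++
        [if value + 1 < (xs.length : Int) then
           pvRow (PySem.List.pyGetD xs value "") (PySem.List.pyGetD xs (value + 1) "")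
         else pvRow (PySem.List.pyGetD xs value "") " "]) := by
    funext acc v
    split <;> rfl
  rw [hfun, PySem.List.foldl_append_singleton_eq_map, List.nil_append]
  exact go_main xs
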